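-- pv_equiv track=rewrite | github.com/AkumaEX/beecrowd | MATEMÁTICA/2149/main.py | phill_bonati
-- ===== SOURCE A (Python) =====
-- def phill_bonati(n, memo):
--     if memo[n] == 0:
--         if n < 2:
--             memo[n] = n
--         elif n % 2:
--             memo[n] = phill_bonati(n-1, memo) * phill_bonati(n-2, memo)
--         else:
--             memo[n] = phill_bonati(n-1, memo) + phill_bonati(n-2, memo)
--     return memo[n]
-- ===== SOURCE B (Python) =====
-- def phill_bonati(n, memo):
--     # Iterative bottom-up version; like the original it fills zero entries of
--     # memo in place (it may fill entries the recursive version never visits).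
--     if memo[n] != 0:
--         return memo[n]
--     if n < 2:
--         memo[n] = n
--         return n
--     if memo[1] == 0:
--         memo[1] = 1
--     for i in range(2, n + 1):
--         if memo[i] == 0:
--             memo[i] = memo[i-1] * memo[i-2] if i % 2 else memo[i-1] + memo[i-2]
--     return memo[n]
-- ===== Notes on version B (the rewrite author's own statement) =====
-- stated objective: alternative
-- what changed: Replaces A's top-down memoized self-recursion with a bottom-up iterative loop that fills the zero entries of memo in index order from 2 to n; the return value is identical (both mutate memo in place; B may fill zero entries A's recursion never visits, which is invisible in the return value).
import Mathlib
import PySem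

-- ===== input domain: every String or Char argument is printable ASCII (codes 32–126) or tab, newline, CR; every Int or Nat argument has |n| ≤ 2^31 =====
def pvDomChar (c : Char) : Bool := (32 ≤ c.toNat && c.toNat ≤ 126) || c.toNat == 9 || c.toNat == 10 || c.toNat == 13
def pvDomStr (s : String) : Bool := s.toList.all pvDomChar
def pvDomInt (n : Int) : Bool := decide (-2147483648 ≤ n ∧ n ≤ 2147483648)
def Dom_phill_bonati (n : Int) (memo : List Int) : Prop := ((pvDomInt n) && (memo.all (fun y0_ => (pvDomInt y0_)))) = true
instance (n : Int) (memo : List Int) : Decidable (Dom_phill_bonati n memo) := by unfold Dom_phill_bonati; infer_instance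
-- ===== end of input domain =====

-- B replaces A's top-down memoized recursion by a bottom-up loop that fills the
-- zero entries of memo in index order (objective: simpler/iterative decomposition).
-- Both A and B mutate memo in place; the equivalence proved here is about the
-- RETURN value only (B may fill zero entries that A's recursion never visits).

-- ===== PORT A =====
-- A's self-recursion, threaded through the mutated memo; fuel = n.toNat + 1
-- bounds the recursion depth (each call recurses only on smaller non-negative n).
def phillA : Nat → Int → List Int → Int × List Int
  | 0, _, memo => (0, memo)  -- never reached with fuel = n.toNat + 1
  | fuel+1, n, memo =>
    if PySem.List.pyGetD memo n 0 == 0 then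
      if n < 2 then
        let memo := PySem.List.pySetD memo n n
        (PySem.List.pyGetD memo n 0, memo)
      else if PySem.Int.mod n 2 ≠ 0 then
        let r1 := phillA fuel (n-1) memo
        let r2 := phillA fuel (n-2) r1.2
        let memo := PySem.List.pySetD r2.2 n (r1.1 * r2.1)
        (PySem.List.pyGetD memo n 0, memo)
      else
        let r1 := phillA fuel (n-1) memo
        let r2 := phillA fuel (n-2) r1.2
        let memo := PySem.List.pySetD r2.2 n (r1.1 + r2.1)
        (PySem.List.pyGetD memo n 0, memo)
    else (PySem.List.pyGetD memo n 0, memo)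

def phill_bonati (n : Int) (memo : List Int) : Int := (phillA (n.toNat + 1) n memo).1

-- ===== PORT B =====
-- body of Source B's for-loop
def phillBStep (m : List Int) (i : Int) : List Int :=
  if PySem.List.pyGetD m i 0 == 0 then
    PySem.List.pySetD m i
      (if PySem.Int.mod i 2 ≠ 0 then
         PySem.List.pyGetD m (i-1) 0 * PySem.List.pyGetD m (i-2) 0
       else
         PySem.List.pyGetD m (i-1) 0 + PySem.List.pyGetD m (i-2) 0)
  else m

def phill_bonati_alt (n : Int) (memo : List Int) : Int :=
  let v := PySem.List.pyGetD memo n 0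
  if v ≠ 0 then v
  else if n < 2 then n
  else
    let memo1 := if PySem.List.pyGetD memo 1 0 == 0 then PySem.List.pySetD memo 1 1 else memo
    let memo2 := (PySem.List.pyRange 2 (n+1) 1).foldl phillBStep memo1
    PySem.List.pyGetD memo2 n 0

-- ===== PRECONDITION & SPEC =====
-- Pre_ excludes exactly the inputs where Python's memo[n] raises IndexError
-- (in A and in B alike): n must be a valid (possibly negative) index of memo.
def Pre_phill_bonati (n : Int) (memo : List Int) : Prop := PySem.Raise.InRange memo.length n
instance (n : Int) (memo : List Int) : Decidable (Pre_phill_bonati n memo) := by unfold Pre_phill_bonati; infer_instance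

def pvWitness_phill_bonati : Int × List Int := (3, [0, 0, 0, 0])

def Spec_phill_bonati (n : Int) (memo : List Int) (out : Int) : Prop := out = phill_bonati_alt n memo
instance (n : Int) (memo : List Int) (out : Int) : Decidable (Spec_phill_bonati n memo out) := by unfold Spec_phill_bonati; infer_instance

-- ===== CLAIM (what is proved, stated in full; the proofs are below) =====
def Claim_equal_phill_bonati : Prop := ∀ (n : Int) (memo : List Int), Dom_phill_bonati n memo → Pre_phill_bonati n memo → Spec_phill_bonati n memo (phill_bonati n memo)

-- ===== LEMMAS AND PROOFS =====

-- the pure value both programs compute for index k, as a function of the ORIGINAL memo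
def phi (memo : List Int) : Nat → Int
  | 0 => if memo.getD 0 0 ≠ 0 then memo.getD 0 0 else 0
  | 1 => if memo.getD 1 0 ≠ 0 then memo.getD 1 0 else 1
  | (k+2) =>
    if memo.getD (k+2) 0 ≠ 0 then memo.getD (k+2) 0
    else if (k+2) % 2 ≠ 0 then phi memo (k+1) * phi memo k
    else phi memo (k+1) + phi memo k

lemma phi_of_ne (memo : List Int) (k : Nat) (h : memo.getD k 0 ≠ 0) :
    phi memo k = memo.getD k 0 := by
  match k with
  | 0 => simp only [phi]; rw [if_pos h]
  | 1 => simp only [phi]; rw [if_pos h]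
  | k+2 => simp only [phi]; rw [if_pos h]

def MInv (memo memo' : List Int) : Prop :=
  memo'.length = memo.length ∧
  ∀ j : Nat, memo'.getD j 0 = memo.getD j 0 ∨ (memo.getD j 0 = 0 ∧ memo'.getD j 0 = phi memo j)

lemma inv_refl (memo : List Int) : MInv memo memo := ⟨rfl, fun _ => Or.inl rfl⟩

lemma phi_inv {memo memo' : List Int} (h : MInv memo memo') : ∀ k, phi memo' k = phi memo k := by
  intro k
  induction k using Nat.strong_induction_on with
  | _ k ih =>
    rcases h.2 k with hk | ⟨hk0, hkp⟩
    · match k with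
      | 0 => simp only [phi]; rw [hk]
      | 1 => simp only [phi]; rw [hk]
      | k+2 => simp only [phi]; rw [hk, ih (k+1) (by omega), ih k (by omega)]
    · by_cases hz : phi memo k = 0
      · match k with
        | 0 =>
          have h0 : phi memo 0 = 0 := by simp only [phi]; rw [if_neg (not_not_intro hk0)]
          simp only [phi]; rw [hkp, h0, hk0]
        | 1 =>
          have h1 : phi memo 1 = 1 := by simp only [phi]; rw [if_neg (not_not_intro hk0)]
          exact absurd (h1 ▸ hz) one_ne_zero
        | k+2 =>
          have h2 : phi memo (k+2) = 0 := hz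
          simp only [phi]
          rw [hkp, h2, hk0, ih (k+1) (by omega), ih k (by omega)]
      · rw [phi_of_ne memo' k (by rw [hkp]; exact hz), hkp]

lemma inv_trans {memo m1 m2 : List Int} (h1 : MInv memo m1) (h2 : MInv m1 m2) : MInv memo m2 := by
  refine ⟨h2.1.trans h1.1, fun j => ?_⟩
  rcases h2.2 j with hj | ⟨hj0, hjp⟩
  · rw [hj]; exact h1.2 j
  · rcases h1.2 j with hj1 | ⟨hj10, _⟩
    · exact Or.inr ⟨hj1 ▸ hj0, by rw [hjp, phi_inv h1]⟩
    · exact Or.inr ⟨hj10, by rw [hjp, phi_inv h1]⟩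

lemma inv_set {memo m2 : List Int} (h : MInv memo m2) (k : Nat) (hk0 : memo.getD k 0 = 0)
    (hkl : k < m2.length) : MInv memo (m2.set k (phi memo k)) := by
  refine ⟨by simpa using h.1, fun j => ?_⟩
  by_cases hj : j = k
  · subst hj
    exact Or.inr ⟨hk0, by simp [List.getD, List.getElem?_set_self hkl]⟩
  · have : (m2.set k (phi memo k)).getD j 0 = m2.getD j 0 := by
      simp [List.getD, List.getElem?_set_ne (by omega : k ≠ j)]
    rw [this]; exact h.2 j

lemma getD_set_self (m : List Int) (k : Nat) (v : Int) (h : k < m.length) :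
    (m.set k v).getD k 0 = v := by
  simp [List.getD, List.getElem?_set_self h]

lemma fmod_two_cast (k : Nat) : PySem.Int.mod (k : Int) 2 = ((k % 2 : Nat) : Int) := by
  show Int.fmod _ _ = _
  rw [Int.fmod_eq_emod, if_pos (Or.inl (by norm_num : (0:Int) ≤ 2)), add_zero]
  omega

lemma phillA_correct : ∀ (fuel : Nat) (k : Nat) (memo : List Int), k < fuel → k < memo.length →
    (phillA fuel (k : Int) memo).1 = phi memo k ∧ MInv memo (phillA fuel (k : Int) memo).2 := by
  intro fuel
  induction fuel with
  | zero => intro k memo hf _; omega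
  | succ f ih =>
    intro k memo hf hl
    have hget : PySem.List.pyGetD memo (k : Int) 0 = memo.getD k 0 := by
      simp [PySem.List.pyGetD_natCast]
    by_cases hz : memo.getD k 0 = 0
    · by_cases h2 : k < 2
      · -- k = 0 or 1
        have hset : PySem.List.pySetD memo (k : Int) (k : Int) = memo.set k (k : Int) := by
          simp [PySem.List.pySetD_natCast]
        have hphi : phi memo k = (k : Int) := by
          interval_cases k
          · simp only [phi]; rw [if_neg (not_not_intro hz)]; norm_num
          · simp only [phi]; rw [if_neg (not_not_intro hz)]; norm_num
        have hA : phillA (f+1) (k : Int) memo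
            = (PySem.List.pyGetD (memo.set k (k : Int)) (k : Int) 0, memo.set k (k : Int)) := by
          simp only [phillA, hget, hz, BEq.rfl, if_true, hset]
          rw [if_pos (by exact_mod_cast h2)]
        rw [hA]
        constructor
        · have : PySem.List.pyGetD (memo.set k (k : Int)) (k : Int) 0
              = (memo.set k (k : Int)).getD k 0 := by simp [PySem.List.pyGetD_natCast]
          rw [this, getD_set_self _ _ _ (by simpa using hl), hphi]
        · have := inv_set (inv_refl memo) k hz (by simpa using hl)
          rwa [hphi] at this
      · -- k ≥ 2
        obtain ⟨m, rfl⟩ : ∃ m, k = m + 2 := ⟨k - 2, by omega⟩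
        have hc1 : ((m+2 : Nat) : Int) - 1 = ((m+1 : Nat) : Int) := by push_cast; ring
        have hc2 : ((m+2 : Nat) : Int) - 2 = ((m : Nat) : Int) := by push_cast; ring
        have h1 := ih (m+1) memo (by omega) (by omega)
        obtain ⟨ha1, hi1⟩ := h1
        have h2' := ih m (phillA f ((m+1 : Nat) : Int) memo).2 (by omega)
          (by rw [hi1.1]; omega)
        obtain ⟨ha2, hi2⟩ := h2'
        have hval2 : (phillA f ((m : Nat) : Int) (phillA f ((m+1 : Nat) : Int) memo).2).1
            = phi memo m := by rw [ha2, phi_inv hi1]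
        have hinv2 : MInv memo (phillA f ((m : Nat) : Int) (phillA f ((m+1 : Nat) : Int) memo).2).2 :=
          inv_trans hi1 hi2
        set m2 := (phillA f ((m : Nat) : Int) (phillA f ((m+1 : Nat) : Int) memo).2).2 with hm2
        have hm2len : m2.length = memo.length := hinv2.1
        have hphik : phi memo (m+2)
            = (if (m+2) % 2 ≠ 0 then phi memo (m+1) * phi memo m
               else phi memo (m+1) + phi memo m) := by
          simp only [phi, hz, ne_eq, not_true_eq_false, if_false]
        by_cases hpar : (m+2) % 2 ≠ 0
        · have hparI : PySem.Int.mod ((m+2 : Nat) : Int) 2 ≠ 0 := by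
            rw [fmod_two_cast]; exact Int.natCast_ne_zero.mpr hpar
          have hA : phillA (f+1) ((m+2 : Nat) : Int) memo
              = (PySem.List.pyGetD (m2.set (m+2) (phi memo (m+1) * phi memo m)) ((m+2 : Nat) : Int) 0,
                 m2.set (m+2) (phi memo (m+1) * phi memo m)) := by
            simp only [phillA, hget, hz, BEq.rfl, if_true]
            rw [if_neg (by push_cast; omega), if_pos hparI, hc1, hc2]
            rw [ha1, hval2, ← hm2, PySem.List.pySetD_natCast]
          rw [hA]
          constructor
          · have : PySem.List.pyGetD (m2.set (m+2) (phi memo (m+1) * phi memo m)) ((m+2 : Nat) : Int) 0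
                = (m2.set (m+2) (phi memo (m+1) * phi memo m)).getD (m+2) 0 := by
              rw [PySem.List.pyGetD_natCast]
            rw [this, getD_set_self _ _ _ (by omega), hphik, if_pos hpar]
          · have := inv_set hinv2 (m+2) hz (by omega)
            rwa [hphik, if_pos hpar] at this
        · have hparI : ¬ PySem.Int.mod ((m+2 : Nat) : Int) 2 ≠ 0 := by
            rw [fmod_two_cast, (by omega : (m+2) % 2 = 0)]; simp
          have hA : phillA (f+1) ((m+2 : Nat) : Int) memo
              = (PySem.List.pyGetD (m2.set (m+2) (phi memo (m+1) + phi memo m)) ((m+2 : Nat) : Int) 0,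
                 m2.set (m+2) (phi memo (m+1) + phi memo m)) := by
            simp only [phillA, hget, hz, BEq.rfl, if_true]
            rw [if_neg (by push_cast; omega), if_neg hparI, hc1, hc2]
            rw [ha1, hval2, ← hm2, PySem.List.pySetD_natCast]
          rw [hA]
          constructor
          · have : PySem.List.pyGetD (m2.set (m+2) (phi memo (m+1) + phi memo m)) ((m+2 : Nat) : Int) 0
                = (m2.set (m+2) (phi memo (m+1) + phi memo m)).getD (m+2) 0 := by
              rw [PySem.List.pyGetD_natCast]
            rw [this, getD_set_self _ _ _ (by omega), hphik, if_neg hpar]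
          · have := inv_set hinv2 (m+2) hz (by omega)
            rwa [hphik, if_neg hpar] at this
    · -- cached
      have hA : phillA (f+1) (k : Int) memo = (PySem.List.pyGetD memo (k : Int) 0, memo) := by
        simp only [phillA, hget]
        rw [if_neg (by simpa using hz)]
      rw [hA]
      exact ⟨by rw [hget, phi_of_ne memo k hz], inv_refl memo⟩

lemma getD_eq_of_lt (m : List Int) (k : Nat) (h : k < m.length) : m.getD k 0 = m[k] := by
  simp [List.getD, List.getElem?_eq_getElem h]

lemma getD_set_ne (m : List Int) (k j : Nat) (v : Int) (h : k ≠ j) :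
    (m.set k v).getD j 0 = m.getD j 0 := by
  simp [List.getD, List.getElem?_set_ne h]

lemma pyGetD_pySetD_self (xs : List Int) (i v : Int)
    (h1 : -(xs.length : Int) ≤ i) (h2 : i < (xs.length : Int)) :
    PySem.List.pyGetD (PySem.List.pySetD xs i v) i 0 = v := by
  by_cases h0 : 0 ≤ i
  · rw [PySem.List.pySetD_of_nonneg xs v h0,
        PySem.List.pyGetD_eq_getElem _ 0 h0 (by simpa using h2)]
    rw [List.getElem_set_self]
  · obtain ⟨k, rfl, hk1, hk2⟩ : ∃ k : Nat, i = -(k:Int) ∧ 0 < k ∧ k ≤ xs.length :=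
      ⟨(-i).toNat, by omega, by omega, by omega⟩
    have hset : PySem.List.pySetD xs (-(k:Int)) v = xs.set (xs.length - k) v := by
      simp only [PySem.List.pySetD, PySem.List.pySet?, PySem.List.pyIdx?]
      rw [if_neg h0, if_pos (by omega)]
      norm_num
    rw [hset, PySem.List.pyGetD_neg_natCast]
    · simp
    · omega
    · simp; omega

lemma phi_zero (memo : List Int) : phi memo 0 = memo.getD 0 0 := by
  by_cases h : memo.getD 0 0 = 0
  · simp only [phi]; rw [if_neg (not_not_intro h), h]
  · simp only [phi]; rw [if_pos h]

lemma length_phillBStep (m : List Int) (i : Int) : (phillBStep m i).length = m.length := by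
  unfold phillBStep
  split
  · simp [PySem.List.length_pySetD]
  · rfl

lemma length_foldB (l : List Int) (m : List Int) : (l.foldl phillBStep m).length = m.length := by
  induction l generalizing m with
  | nil => rfl
  | cons x xs ih => rw [List.foldl_cons, ih, length_phillBStep]

lemma foldB_correct (memo : List Int) (N : Nat) (hN : N < memo.length) :
    ∀ (c : Nat) (i : Nat) (m : List Int), 1 ≤ i → i + c = N →
      m.length = memo.length →
      (∀ j : Nat, j ≤ i → m.getD j 0 = phi memo j) →
      (∀ j : Nat, i < j → m.getD j 0 = memo.getD j 0) →
      ((PySem.List.pyRange ((i : Int)+1) ((N : Int)+1) 1).foldl phillBStep m).getD N 0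
        = phi memo N := by
  intro c
  induction c with
  | zero =>
    intro i m hi hiN hlen hle _
    have hi' : i = N := by omega
    subst hi'
    have hr : PySem.List.pyRange ((i : Int)+1) ((i : Int)+1) 1 = [] := by
      rw [PySem.List.pyRange_one]; simp
    rw [hr]
    exact hle i le_rfl
  | succ c ih =>
    intro i m hi hiN hlen hle hgt
    have hlt : (i : Int)+1 < (N : Int)+1 := by
      have : (i : Int) < (N : Int) := by exact_mod_cast (by omega : i < N)
      omega
    rw [PySem.List.pyRange_one_cons hlt, List.foldl_cons]
    obtain ⟨p, rfl⟩ : ∃ p, i = p + 1 := ⟨i - 1, by omega⟩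
    have hcast : ((p+1 : Nat) : Int) + 1 = ((p+2 : Nat) : Int) := by push_cast; ring
    have hread : PySem.List.pyGetD m (((p+1 : Nat) : Int)+1) 0 = m.getD (p+2) 0 := by
      rw [hcast, PySem.List.pyGetD_natCast]
    have hm1 : m.getD (p+2) 0 = memo.getD (p+2) 0 := hgt (p+2) (by omega)
    have hcast2 : (((p+2 : Nat) : Int)) + 1 = (((p+1 : Nat) : Int) + 1) + 1 := by push_cast; ring
    by_cases hz : memo.getD (p+2) 0 = 0
    · -- the loop fills this entry
      have hv1 : PySem.List.pyGetD m (((p+1 : Nat) : Int)+1-1) 0 = phi memo (p+1) := by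
        have : ((p+1 : Nat) : Int)+1-1 = ((p+1 : Nat) : Int) := by ring
        rw [this]; simp only [PySem.List.pyGetD_natCast]
        exact hle (p+1) le_rfl
      have hv0 : PySem.List.pyGetD m (((p+1 : Nat) : Int)+1-2) 0 = phi memo p := by
        have : ((p+1 : Nat) : Int)+1-2 = ((p : Nat) : Int) := by push_cast; ring
        rw [this]; simp only [PySem.List.pyGetD_natCast]
        exact hle p (by omega)
      have hpar : PySem.Int.mod (((p+1 : Nat) : Int)+1) 2 = (((p+2) % 2 : Nat) : Int) := by
        rw [hcast, fmod_two_cast]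
      have hstep : phillBStep m (((p+1 : Nat) : Int)+1) = m.set (p+2) (phi memo (p+2)) := by
        unfold phillBStep
        rw [if_pos (by rw [hread, hm1, hz]; exact BEq.rfl)]
        rw [hv1, hv0, hpar, hcast, PySem.List.pySetD_natCast]
        have hphik : phi memo (p+2)
            = (if (p+2) % 2 ≠ 0 then phi memo (p+1) * phi memo p
               else phi memo (p+1) + phi memo p) := by
          simp only [phi, hz, ne_eq, not_true_eq_false, if_false]
        by_cases hp2 : (p+2) % 2 ≠ 0
        · rw [if_pos (by exact_mod_cast (by omega : ¬ (((p+2) % 2 : Nat) : Int) = 0)),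
             hphik, if_pos hp2]
        · have hp0 : (p+2) % 2 = 0 := by omega
          rw [if_neg (by simp [hp0]), hphik, if_neg hp2]
      rw [hstep, hcast2.symm]
      refine ih (p+2) _ (by omega) (by omega) (by simpa using hlen) ?_ ?_
      · intro j hj
        by_cases hj2 : j = p + 2
        · subst hj2; exact getD_set_self _ _ _ (by omega)
        · rw [getD_set_ne _ _ _ _ (by omega)]; exact hle j (by omega)
      · intro j hj
        rw [getD_set_ne _ _ _ _ (by omega)]; exact hgt j (by omega)
    · -- already cached: the loop leaves it alone
      have hstep : phillBStep m (((p+1 : Nat) : Int)+1) = m := by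
        unfold phillBStep
        rw [if_neg (by rw [hread, hm1]; simpa using hz)]
      rw [hstep, hcast2.symm]
      refine ih (p+2) _ (by omega) (by omega) hlen ?_ ?_
      · intro j hj
        by_cases hj2 : j = p + 2
        · subst hj2; rw [hm1]; exact (phi_of_ne memo (p+2) hz).symm
        · exact hle j (by omega)
      · intro j hj
        exact hgt j (by omega)

lemma altB_eq_phi (n : Int) (memo : List Int) (hv : PySem.List.pyGetD memo n 0 = 0)
    (h2 : ¬ n < 2) (hlen : n.toNat < memo.length) :
    phill_bonati_alt n memo = phi memo n.toNat := by
  have h0 : 0 ≤ n := by omega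
  have h1len : 1 < memo.length := by omega
  have hone : PySem.List.pyGetD memo 1 0 = memo.getD 1 0 := by
    rw [PySem.List.pyGetD_eq_getElem _ 0 (by norm_num) (by exact_mod_cast h1len)]
    rw [getD_eq_of_lt _ _ (by simpa using h1len)]
    norm_num
  show (if PySem.List.pyGetD memo n 0 ≠ 0 then PySem.List.pyGetD memo n 0
        else if n < 2 then n else _) = _
  rw [if_neg (by simp [hv]), if_neg h2]
  set memo1 := if (PySem.List.pyGetD memo 1 0 == 0) = true then PySem.List.pySetD memo 1 1 else memo with hmemo1
  have hm1len : memo1.length = memo.length := by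
    rw [hmemo1]; split
    · rw [PySem.List.pySetD_of_nonneg _ _ (by norm_num)]; simp
    · rfl
  have hm1le : ∀ j : Nat, j ≤ 1 → memo1.getD j 0 = phi memo j := by
    intro j hj
    interval_cases j
    · have : memo1.getD 0 0 = memo.getD 0 0 := by
        rw [hmemo1]; split
        · rw [PySem.List.pySetD_of_nonneg _ _ (by norm_num)]
          exact getD_set_ne _ _ _ _ (by norm_num)
        · rfl
      rw [this, phi_zero]
    · by_cases hz1 : memo.getD 1 0 = 0
      · have : memo1 = memo.set 1 1 := by
          rw [hmemo1, if_pos (by rw [hone, hz1]; exact BEq.rfl)]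
          rw [PySem.List.pySetD_of_nonneg _ _ (by norm_num)]; rfl
        rw [this, getD_set_self _ _ _ (by simpa using h1len)]
        have hz1' : memo[1]?.getD 0 = 0 := hz1
        simp [phi, hz1']
      · have : memo1 = memo := by
          rw [hmemo1, if_neg (by rw [hone]; simpa using hz1)]
        rw [this, phi_of_ne memo 1 hz1]
  have hm1gt : ∀ j : Nat, 1 < j → memo1.getD j 0 = memo.getD j 0 := by
    intro j hj
    rw [hmemo1]; split
    · rw [PySem.List.pySetD_of_nonneg _ _ (by norm_num)]
      exact getD_set_ne _ _ _ _ (by omega)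
    · rfl
  have hfold := foldB_correct memo n.toNat hlen (n.toNat - 1) 1 memo1 le_rfl (by omega)
      hm1len hm1le hm1gt
  have hrange : PySem.List.pyRange (((1 : Nat) : Int)+1) (((n.toNat : Nat) : Int)+1) 1
      = PySem.List.pyRange 2 (n+1) 1 := by
    norm_num
    congr 1
    omega
  rw [hrange] at hfold
  set res := (PySem.List.pyRange 2 (n+1) 1).foldl phillBStep memo1 with hres
  have hreslen : (res : List Int).length = memo.length := by
    rw [hres, length_foldB]; exact hm1len
  have hn : n < ((res : List Int).length : Int) := by rw [hreslen]; omega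
  rw [PySem.List.pyGetD_eq_getElem _ 0 h0 hn]
  rw [← getD_eq_of_lt _ _ (by omega)]
  exact hfold

theorem phill_bonati_spec : Claim_equal_phill_bonati := by
  intro n memo _ hpre
  obtain ⟨hp1, hp2⟩ := hpre
  unfold Spec_phill_bonati phill_bonati
  by_cases hv : PySem.List.pyGetD memo n 0 = 0
  · by_cases h2 : n < 2
    · have hA : (phillA (n.toNat+1) n memo).1
          = PySem.List.pyGetD (PySem.List.pySetD memo n n) n 0 := by
        simp only [phillA]
        rw [if_pos (by rw [hv]; exact BEq.rfl), if_pos h2]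
      rw [hA, pyGetD_pySetD_self memo n n hp1 hp2]
      show n = phill_bonati_alt n memo
      unfold phill_bonati_alt
      rw [if_neg (by simp [hv]), if_pos h2]
    · have hlen : n.toNat < memo.length := by omega
      have hkey : n = ((n.toNat : Nat) : Int) := by omega
      have hA : (phillA (n.toNat+1) n memo).1 = phi memo n.toNat := by
        rw [hkey] at hv ⊢
        exact (phillA_correct (n.toNat+1) n.toNat memo (by omega)
          (by simpa using hlen)).1
      rw [hA, altB_eq_phi n memo hv h2 hlen]
  · have hA : (phillA (n.toNat+1) n memo).1 = PySem.List.pyGetD memo n 0 := by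
      simp only [phillA]
      rw [if_neg (by simpa using hv)]
    rw [hA]
    show _ = phill_bonati_alt n memo
    unfold phill_bonati_alt
    rw [if_pos (by simpa using hv)]
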